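-- pv_equiv track=rewrite | github.com/BathroomEpiphanies/adventofcode_2023 | 15/solution.py | part2
-- ===== SOURCE A (Python) =====
-- from collections import defaultdict
--
-- def hash(string:str) -> int:
--     current_value = 0
--     for c in string:
--         current_value += ord(c)
--         current_value *= 17
--         current_value %= 256
--     return current_value
--
-- def part2(problem_input:list[str]) -> int:
--     # dict key insertion order is persistent on iteration
--     boxes:dict[int,dict[str,int]] = defaultdict(dict)
--     for lens in problem_input:
--         if '=' in lens:
--             name,focal_length = lens.split('=')
--             boxes[hash(name)+1][name] = int(focal_length)
--         elif '-' in lens: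
--             name,*_ = lens.split('-')
--             try:
--                 del(boxes[hash(name)+1][name])
--             except KeyError:
--                 pass
--     return sum(
--         box_number*lens_slot*focal_length \
--         for box_number,box in boxes.items() \
--         for lens_slot,(_,focal_length) in enumerate(box.items(), start=1)
--     )
-- ===== SOURCE B (Python) =====
-- # B: one flat insertion-ordered dict of all lenses instead of a dict of per-box dicts;
-- # the focusing power is recovered in a single scoring pass with per-box slot counters.
-- def hash(string: str) -> int:
--     current_value = 0
--     for c in string:
--         current_value += ord(c)
--         current_value *= 17
--         current_value %= 256
--     return current_value
--
-- def part2(problem_input: list[str]) -> int: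
--     lenses: dict[str, int] = {}
--     for op in problem_input:
--         if '=' in op:
--             name, focal = op.split('=')
--             lenses[name] = int(focal)
--         elif '-' in op:
--             name = op.split('-')[0]
--             lenses.pop(name, None)
--     slots: dict[int, int] = {}
--     total = 0
--     for name, focal in lenses.items():
--         h = hash(name)
--         s = slots.get(h, 0) + 1
--         slots[h] = s
--         total += (h + 1) * s * focal
--     return total
-- ===== Notes on version B (the rewrite author's own statement) =====
-- stated objective: simpler
-- what changed: Replaces the defaultdict-of-dicts of boxes by one flat insertion-ordered dict of all lenses (hash classes never interact, so one dict preserves each box's slot order) and computes the focusing power in a single scoring pass with per-hash slot counters instead of a nested enumerate over boxes.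
import Mathlib
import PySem

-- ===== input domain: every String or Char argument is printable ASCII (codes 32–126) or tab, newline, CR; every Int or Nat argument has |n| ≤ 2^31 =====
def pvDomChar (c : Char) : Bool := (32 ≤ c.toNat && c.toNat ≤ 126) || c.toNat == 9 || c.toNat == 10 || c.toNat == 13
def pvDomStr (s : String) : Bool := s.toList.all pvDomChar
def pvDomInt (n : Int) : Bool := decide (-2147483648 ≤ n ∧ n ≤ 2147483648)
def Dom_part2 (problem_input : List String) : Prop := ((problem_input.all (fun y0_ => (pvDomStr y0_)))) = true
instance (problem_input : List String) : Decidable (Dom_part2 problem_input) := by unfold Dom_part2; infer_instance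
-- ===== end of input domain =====

-- B replaces A's defaultdict-of-dicts by ONE flat insertion-ordered dict of lenses plus a
-- single scoring pass with per-box slot counters (objective: simpler; return value only).

-- ===== PORT A =====
-- shared helper: s.split(sep) for the non-empty literal separators used here (split? is `some` there)
def pvSplit (s sep : String) : List String := (PySem.Str.split? s sep).getD []

-- shared helper: the Python 'hash' defined in the module (identical in Source A and Source B)
def pvHash (s : String) : Int :=
  s.toList.foldl (fun v c => PySem.Int.mod ((v + (c.toNat : Int)) * 17) 256) 0

-- one iteration of A's loop over problem_input
def pvStepA (boxes : PySem.Dict Int (PySem.Dict String Int)) (lens : String) :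
    PySem.Dict Int (PySem.Dict String Int) :=
  if PySem.Str.isIn "=" lens then
    match pvSplit lens "=" with
    | [name, focal] =>
      match PySem.Int.ofStr? focal with
      | some f =>
          -- defaultdict access then item assignment
          boxes.insert (pvHash name + 1)
            ((boxes.getD (pvHash name + 1) PySem.Dict.empty).insert name f)
      | none => boxes   -- Python raises ValueError here; excluded by Pre_part2
    | _ => boxes        -- Python raises ValueError here (unpacking); excluded by Pre_part2
  else if PySem.Str.isIn "-" lens then
    -- defaultdict access creates the (possibly empty) box; 'del' with KeyError swallowed = erase
    boxes.insert (pvHash ((pvSplit lens "-").headD "") + 1)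
      ((boxes.getD (pvHash ((pvSplit lens "-").headD "") + 1) PySem.Dict.empty).erase
        ((pvSplit lens "-").headD ""))
  else boxes

def part2 (problem_input : List String) : Int :=
  let boxes := problem_input.foldl pvStepA PySem.Dict.empty
  (boxes.items.map (fun kb =>
    ((PySem.List.enumerate kb.2.items 1).map (fun se => kb.1 * se.1 * se.2.2)).sum)).sum

-- ===== PORT B =====
-- one iteration of B's loop over problem_input (one flat dict of all lenses)
def pvStepB (lenses : PySem.Dict String Int) (op : String) : PySem.Dict String Int :=
  if PySem.Str.isIn "=" op then
    match pvSplit op "=" with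
    | [name, focal] =>
      match PySem.Int.ofStr? focal with
      | some f => lenses.insert name f
      | none => lenses   -- Python raises ValueError here; excluded by Pre_part2
    | _ => lenses        -- Python raises ValueError here (unpacking); excluded by Pre_part2
  else if PySem.Str.isIn "-" op then
    lenses.erase ((pvSplit op "-").headD "")   -- lenses.pop(name, None)
  else lenses

-- one iteration of B's scoring pass (state: per-hash slot counters, running total)
def pvScoreStep (st : PySem.Dict Int Int × Int) (nf : String × Int) : PySem.Dict Int Int × Int :=
  let h := pvHash nf.1
  let s := st.1.getD h 0 + 1
  (st.1.insert h s, st.2 + (h + 1) * s * nf.2)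

def part2_alt (problem_input : List String) : Int :=
  let lenses := problem_input.foldl pvStepB PySem.Dict.empty
  (lenses.items.foldl pvScoreStep (PySem.Dict.empty, 0)).2

-- ===== PRECONDITION & SPEC =====
-- Pre_part2 excludes exactly the inputs on which the Python raises ValueError: an operation
-- containing '=' whose split is not exactly two parts or whose focal part is not int()-parsable.
def Pre_part2 (problem_input : List String) : Prop :=
  ∀ s ∈ problem_input, PySem.Str.isIn "=" s = true →
    ((pvSplit s "=").length = 2 ∧
      (PySem.Int.ofStr? ((pvSplit s "=").getD 1 "")).isSome = true)
instance (problem_input : List String) : Decidable (Pre_part2 problem_input) := by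
  unfold Pre_part2; infer_instance

def pvWitness_part2 : List String := ["ab=3", "cd-", "ab-", "x=10", "ab=5", "pc=6"]

def Spec_part2 (problem_input : List String) (out : Int) : Prop := out = part2_alt problem_input
instance (problem_input : List String) (out : Int) : Decidable (Spec_part2 problem_input out) := by
  unfold Spec_part2; infer_instance

-- ===== CLAIM (what is proved, stated in full; the proofs are below) =====
def Claim_equal_part2 : Prop := ∀ (problem_input : List String), Dom_part2 problem_input → Pre_part2 problem_input → Spec_part2 problem_input (part2 problem_input)

-- ===== LEMMAS AND PROOFS =====

-- weighted sum of focal lengths, slots counted from c+1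
def pvWsum (c : Int) : List (String × Int) → Int
  | [] => 0
  | x :: r => (c + 1) * x.2 + pvWsum (c + 1) r

-- the common regrouped value both scores are proved equal to
def pvG (L : PySem.Dict String Int) (k : Int) : Int :=
  k * pvWsum 0 (L.items.filter (fun nf => pvHash nf.1 + 1 == k))

-- the simulation invariant between A's boxes and B's flat dict
def pvInv (boxes : PySem.Dict Int (PySem.Dict String Int)) (L : PySem.Dict String Int) : Prop :=
  boxes.keys.Nodup ∧
  (∀ k ∈ boxes.keys, ∃ h : ℕ, h < 256 ∧ k = (h : Int) + 1) ∧
  (∀ k : Int, (boxes.getD k PySem.Dict.empty).items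
      = L.items.filter (fun nf => pvHash nf.1 + 1 == k))

theorem pvHash_bounds (s : String) : 0 ≤ pvHash s ∧ pvHash s < 256 := by
  have aux : ∀ (l : List Char) (v : Int), 0 ≤ v → v < 256 →
      0 ≤ l.foldl (fun v c => PySem.Int.mod ((v + (c.toNat : Int)) * 17) 256) v ∧
      l.foldl (fun v c => PySem.Int.mod ((v + (c.toNat : Int)) * 17) 256) v < 256 := by
    intro l
    induction l with
    | nil => intro v h1 h2; exact ⟨h1, h2⟩
    | cons c t ih =>
        intro v _ _
        exact ih _ (PySem.Int.mod_nonneg _ (by norm_num)) (PySem.Int.mod_lt _ (by norm_num))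
  exact aux s.toList 0 le_rfl (by norm_num)

theorem pvBeqShift (a b : Int) : (a + 1 == b + 1) = (a == b) := by
  by_cases h : a = b
  · simp [h]
  · simp [h, show a + 1 ≠ b + 1 by omega]

-- the first filter keeps every entry named `name`, so `any (== name)` is unchanged
theorem pvFiltAnyPos (q : String → Bool) (name : String) (hq : q name = true)
    (l : List (String × Int)) :
    ((l.filter (fun nf => q nf.1)).any (fun p => p.1 == name)) = l.any (fun p => p.1 == name) := by
  induction l with
  | nil => rfl
  | cons a t ih =>
      obtain ⟨an, av⟩ := a
      by_cases ha : an = name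
      · subst ha
        simp [hq]
      · by_cases hqa : q an = true
        · simp [hqa, ih]
        · simp [hqa, ih, ha]

-- in-place overwrite of `name` commutes with a filter that keeps `name`
theorem pvFiltMapPos (q : String → Bool) (name : String) (f : Int) (hq : q name = true)
    (l : List (String × Int)) :
    List.map (fun p => if (p.1 == name) = true then (name, f) else p)
        (l.filter (fun nf => q nf.1))
      = List.filter (fun nf => q nf.1)
          (List.map (fun p => if (p.1 == name) = true then (name, f) else p) l) := by
  rw [List.filter_map]
  have h : ∀ x ∈ l, (fun nf : String × Int => q nf.1) x
      = ((fun nf : String × Int => q nf.1) ∘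
          (fun p : String × Int => if (p.1 == name) = true then (name, f) else p)) x := by
    intro x _
    by_cases hx : x.1 = name
    · simp [hx, hq]
    · simp [hx]
  rw [List.filter_congr h]


-- in-place overwrite of `name` vanishes under a filter that rejects `name`
theorem pvFiltMapNeg (q : String → Bool) (name : String) (f : Int) (hq : q name = false)
    (l : List (String × Int)) :
    List.filter (fun nf => q nf.1)
        (List.map (fun p => if (p.1 == name) = true then (name, f) else p) l)
      = l.filter (fun nf => q nf.1) := by
  rw [List.filter_map]
  have h : ∀ x ∈ l, ((fun nf : String × Int => q nf.1) ∘
      (fun p : String × Int => if (p.1 == name) = true then (name, f) else p)) x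
        = (fun nf : String × Int => q nf.1) x := by
    intro x _
    by_cases hx : x.1 = name
    · simp [hx, hq]
    · simp [hx]
  rw [List.filter_congr h]
  have h2 : ∀ x ∈ l.filter (fun nf : String × Int => q nf.1),
      (if (x.1 == name) = true then (name, f) else x) = x := by
    intro x hx
    have hQ : q x.1 = true := by simpa using List.of_mem_filter hx
    have hx1 : x.1 ≠ name := fun he => by rw [he, hq] at hQ; exact Bool.false_ne_true hQ
    simp [hx1]
  calc List.map (fun p : String × Int => if (p.1 == name) = true then (name, f) else p)
        (l.filter (fun nf => q nf.1))
      = List.map id (l.filter (fun nf => q nf.1)) := List.map_congr_left h2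
    _ = l.filter (fun nf => q nf.1) := List.map_id _


theorem pvFiltInsertPos (q : String → Bool) (name : String) (f : Int) (hq : q name = true)
    (l : List (String × Int)) :
    ((PySem.Dict.mk (l.filter (fun nf => q nf.1))).insert name f).items
      = ((PySem.Dict.mk l).insert name f).items.filter (fun nf => q nf.1) := by
  by_cases hc : l.any (fun p => p.1 == name) = true
  · have hc' : (l.filter (fun nf => q nf.1)).any (fun p => p.1 == name) = true := by
      rw [pvFiltAnyPos q name hq]; exact hc
    simp only [PySem.Dict.insert, PySem.Dict.contains, hc, hc', if_pos]
    exact pvFiltMapPos q name f hq l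
  · have hc' : (l.filter (fun nf => q nf.1)).any (fun p => p.1 == name) = false := by
      rw [pvFiltAnyPos q name hq]; exact Bool.eq_false_iff.2 hc
    simp only [PySem.Dict.insert, PySem.Dict.contains,
      Bool.eq_false_iff.2 hc, hc', if_neg, Bool.false_eq_true, not_false_iff]
    rw [List.filter_append]
    simp [hq]

theorem pvFiltInsertNeg (q : String → Bool) (name : String) (f : Int) (hq : q name = false)
    (l : List (String × Int)) :
    ((PySem.Dict.mk l).insert name f).items.filter (fun nf => q nf.1)
      = l.filter (fun nf => q nf.1) := by
  by_cases hc : l.any (fun p => p.1 == name) = true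
  · simp only [PySem.Dict.insert, PySem.Dict.contains, hc, if_pos]
    exact pvFiltMapNeg q name f hq l
  · simp only [PySem.Dict.insert, PySem.Dict.contains,
      Bool.eq_false_iff.2 hc, Bool.false_eq_true, if_neg, not_false_iff]
    rw [List.filter_append]
    simp [hq]

-- dropping the entries named `name` does not change a filter that rejects `name` anyway
theorem pvFiltEraseNeg (q : String → Bool) (name : String) (hq : q name = false)
    (l : List (String × Int)) :
    (l.filter (fun nf => !(nf.1 == name))).filter (fun nf => q nf.1)
      = l.filter (fun nf => q nf.1) := by
  induction l with
  | nil => rfl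
  | cons a t ih =>
      obtain ⟨an, av⟩ := a
      by_cases ha : an = name
      · subst ha
        simp only [List.filter_cons, hq]
        simpa using ih
      · by_cases hqa : q an = true <;>
          simp only [List.filter_cons, hqa, if_true,
            if_neg, Bool.false_eq_true, not_false_iff] <;>
          simpa [ha, hqa] using ih

-- inserting at a key of the form hash+1 preserves the two key-side invariants
theorem pvKeysInsert (boxes : PySem.Dict Int (PySem.Dict String Int)) (name : String)
    (B0 : PySem.Dict String Int)
    (hnd : boxes.keys.Nodup)
    (hrange : ∀ k ∈ boxes.keys, ∃ h : ℕ, h < 256 ∧ k = (h : Int) + 1) :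
    (boxes.insert (pvHash name + 1) B0).keys.Nodup ∧
      (∀ k ∈ (boxes.insert (pvHash name + 1) B0).keys, ∃ h : ℕ, h < 256 ∧ k = (h : Int) + 1) := by
  have hb := pvHash_bounds name
  have hk0 : ∃ h : ℕ, h < 256 ∧ pvHash name + 1 = (h : Int) + 1 :=
    ⟨(pvHash name).toNat, by omega, by omega⟩
  by_cases hc : boxes.contains (pvHash name + 1) = true
  · rw [PySem.Dict.keys_insert_of_contains _ _ hc]
    exact ⟨hnd, hrange⟩
  · rw [PySem.Dict.keys_insert_of_not_contains _ _ (Bool.eq_false_iff.2 hc)]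
    constructor
    · have hnm : pvHash name + 1 ∉ boxes.keys := by
        intro hmem
        exact hc ((PySem.Dict.contains_iff_mem_keys boxes _).2 hmem)
      refine List.nodup_append.2 ⟨hnd, List.nodup_singleton _, ?_⟩
      intro a ha b hb
      have hb' : b = pvHash name + 1 := by simpa using hb
      intro hab
      exact hnm ((hab.trans hb') ▸ ha)
    · intro k hk
      rcases List.mem_append.1 hk with h1 | h2
      · exact hrange k h1
      · simp at h2; subst h2; exact hk0

theorem pvInv_step (boxes : PySem.Dict Int (PySem.Dict String Int)) (L : PySem.Dict String Int)
    (op : String)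
    (hpre : PySem.Str.isIn "=" op = true →
      ((pvSplit op "=").length = 2 ∧
        (PySem.Int.ofStr? ((pvSplit op "=").getD 1 "")).isSome = true))
    (hinv : pvInv boxes L) : pvInv (pvStepA boxes op) (pvStepB L op) := by
  obtain ⟨hnd, hrange, hfil⟩ := hinv
  unfold pvStepA pvStepB
  by_cases he : PySem.Str.isIn "=" op = true
  · rw [if_pos he, if_pos he]
    obtain ⟨hlen, hsome⟩ := hpre he
    obtain ⟨name, focal, hps⟩ := List.length_eq_two.1 hlen
    rw [hps] at hsome ⊢
    simp only [List.getD_cons_succ, List.getD_cons_zero] at hsome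
    obtain ⟨f, hf⟩ := Option.isSome_iff_exists.1 hsome
    dsimp only
    rw [hf]
    dsimp only
    have hbeq : (pvHash name + 1 == pvHash name + 1) = true := by simp
    refine ⟨(pvKeysInsert boxes name _ hnd hrange).1, (pvKeysInsert boxes name _ hnd hrange).2, ?_⟩
    intro k
    by_cases hk : k = pvHash name + 1
    · subst hk
      rw [PySem.Dict.getD_insert_self]
      have hbox : boxes.getD (pvHash name + 1) PySem.Dict.empty
          = PySem.Dict.mk (L.items.filter
              (fun nf => pvHash nf.1 + 1 == pvHash name + 1)) :=
        PySem.Dict.ext (hfil _)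
      rw [hbox]
      exact pvFiltInsertPos (fun nm => pvHash nm + 1 == pvHash name + 1) name f hbeq L.items
    · rw [PySem.Dict.getD_insert_of_ne _ _ _ hk, hfil k]
      have hq : (pvHash name + 1 == k) = false := by
        simp only [beq_eq_false_iff_ne, ne_eq]
        exact fun hcontra => hk hcontra.symm
      exact (pvFiltInsertNeg (fun nm => pvHash nm + 1 == k) name f hq L.items).symm
  · rw [if_neg he, if_neg he]
    by_cases hm : PySem.Str.isIn "-" op = true
    · rw [if_pos hm, if_pos hm]
      set name := (pvSplit op "-").headD "" with hname
      refine ⟨(pvKeysInsert boxes name _ hnd hrange).1, (pvKeysInsert boxes name _ hnd hrange).2, ?_⟩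
      intro k
      by_cases hk : k = pvHash name + 1
      · subst hk
        rw [PySem.Dict.getD_insert_self]
        simp only [PySem.Dict.erase]
        rw [hfil _]
        rw [List.filter_filter, List.filter_filter]
        apply List.filter_congr
        intro x _
        rw [Bool.and_comm]
      · rw [PySem.Dict.getD_insert_of_ne _ _ _ hk, hfil k]
        simp only [PySem.Dict.erase]
        have hq : (pvHash name + 1 == k) = false := by
          simp only [beq_eq_false_iff_ne, ne_eq]
          exact fun hcontra => hk hcontra.symm
        exact (pvFiltEraseNeg (fun nm => pvHash nm + 1 == k) name hq L.items).symm
    · rw [if_neg hm, if_neg hm]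
      exact ⟨hnd, hrange, hfil⟩

theorem pvInv_fold (ops : List String) (boxes : PySem.Dict Int (PySem.Dict String Int))
    (L : PySem.Dict String Int)
    (hpre : ∀ s ∈ ops, PySem.Str.isIn "=" s = true →
      ((pvSplit s "=").length = 2 ∧
        (PySem.Int.ofStr? ((pvSplit s "=").getD 1 "")).isSome = true))
    (hinv : pvInv boxes L) : pvInv (ops.foldl pvStepA boxes) (ops.foldl pvStepB L) := by
  induction ops generalizing boxes L with
  | nil => exact hinv
  | cons op rest ih =>
      exact ih _ _ (fun s hs => hpre s (List.mem_cons_of_mem _ hs))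
        (pvInv_step boxes L op (hpre op (List.mem_cons_self)) hinv)

theorem pvEnumSum (l : List (String × Int)) (k : Int) : ∀ c : Int,
    ((PySem.List.enumerate l (c + 1)).map (fun se => k * se.1 * se.2.2)).sum = k * pvWsum c l := by
  induction l with
  | nil => intro c; simp [PySem.List.enumerate, pvWsum]
  | cons x r ih =>
      intro c
      simp only [PySem.List.enumerate, List.map_cons, List.sum_cons, pvWsum, ih (c + 1)]
      ring

theorem pvScoreFold (l : List (String × Int)) : ∀ (slots : PySem.Dict Int Int) (t : Int),
    (l.foldl pvScoreStep (slots, t)).2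
      = t + ∑ h ∈ Finset.range 256,
          ((h : Int) + 1) * pvWsum (slots.getD (h : Int) 0)
            (l.filter (fun nf => pvHash nf.1 == (h : Int))) := by
  induction l with
  | nil =>
      intro slots t
      simp [pvWsum]
  | cons x r ih =>
      intro slots t
      obtain ⟨hnn, hlt⟩ := pvHash_bounds x.1
      have hh : pvHash x.1 = (((pvHash x.1).toNat : ℕ) : Int) := (Int.toNat_of_nonneg hnn).symm
      have hltn : (pvHash x.1).toNat < 256 := by omega
      have hmem : (pvHash x.1).toNat ∈ Finset.range 256 := Finset.mem_range.2 hltn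
      rw [List.foldl_cons]
      simp only [pvScoreStep]
      rw [ih]
      rw [← Finset.add_sum_erase _ _ hmem, ← Finset.add_sum_erase _
        (fun h : ℕ => ((h : Int) + 1) * pvWsum (slots.getD (h : Int) 0)
          ((x :: r).filter (fun nf => pvHash nf.1 == (h : Int)))) hmem]
      have hcong : ∀ h ∈ (Finset.range 256).erase (pvHash x.1).toNat,
          ((h : Int) + 1) * pvWsum ((slots.insert (pvHash x.1) (slots.getD (pvHash x.1) 0 + 1)).getD (h : Int) 0)
              (r.filter (fun nf => pvHash nf.1 == (h : Int)))
            = ((h : Int) + 1) * pvWsum (slots.getD (h : Int) 0)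
              ((x :: r).filter (fun nf => pvHash nf.1 == (h : Int))) := by
        intro h hmem'
        have hne : h ≠ (pvHash x.1).toNat := (Finset.mem_erase.1 hmem').1
        have hne' : (h : Int) ≠ pvHash x.1 := by
          rw [hh]; exact_mod_cast fun hc => hne (by exact_mod_cast hc)
        rw [PySem.Dict.getD_insert_of_ne _ _ _ hne']
        have hfx : (pvHash x.1 == (h : Int)) = false := by
          simp only [beq_eq_false_iff_ne, ne_eq]
          exact fun hc => hne' hc.symm
        rw [List.filter_cons, hfx]
        simp
      rw [Finset.sum_congr rfl hcong]
      -- remaining: the h0 terms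
      have hself : ((slots.insert (pvHash x.1) (slots.getD (pvHash x.1) 0 + 1)).getD
          (((pvHash x.1).toNat : ℕ) : Int) 0) = slots.getD (pvHash x.1) 0 + 1 := by
        rw [← hh]; exact PySem.Dict.getD_insert_self _ _ _ _
      have hfx : (pvHash x.1 == (((pvHash x.1).toNat : ℕ) : Int)) = true := by
        rw [← hh]; simp
      rw [hself, List.filter_cons]
      simp only [hfx]
      rw [← hh]
      simp only [if_true]
      rw [show pvWsum (slots.getD (pvHash x.1) 0)
            (x :: List.filter (fun nf => pvHash nf.1 == pvHash x.1) r)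
          = (slots.getD (pvHash x.1) 0 + 1) * x.2
            + pvWsum (slots.getD (pvHash x.1) 0 + 1)
              (List.filter (fun nf => pvHash nf.1 == pvHash x.1) r) from rfl]
      ring

theorem pvScoreA (boxes : PySem.Dict Int (PySem.Dict String Int)) (L : PySem.Dict String Int)
    (hinv : pvInv boxes L) :
    (boxes.items.map (fun kb =>
      ((PySem.List.enumerate kb.2.items 1).map (fun se => kb.1 * se.1 * se.2.2)).sum)).sum
    = ∑ h ∈ Finset.range 256, pvG L ((h : Int) + 1) := by
  obtain ⟨hnd, hrange, hfil⟩ := hinv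
  rw [PySem.Dict.items_eq_map_keys boxes hnd PySem.Dict.empty, List.map_map]
  have hterm : ∀ kf ∈ boxes.keys,
      ((fun kb : Int × PySem.Dict String Int =>
          ((PySem.List.enumerate kb.2.items 1).map (fun se => kb.1 * se.1 * se.2.2)).sum) ∘
        (fun k => (k, boxes.getD k PySem.Dict.empty))) kf = pvG L kf := by
    intro kf _
    have h1 := pvEnumSum ((boxes.getD kf PySem.Dict.empty).items) kf 0
    have h0 : (0 : Int) + 1 = 1 := by ring
    rw [h0] at h1
    simp only [Function.comp_apply]
    rw [h1, hfil kf]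
    rfl
  rw [List.map_congr_left hterm]
  rw [← List.sum_toFinset (pvG L) hnd]
  have hsub : boxes.keys.toFinset ⊆ (Finset.range 256).image (fun h : ℕ => (h : Int) + 1) := by
    intro k hk
    obtain ⟨h, hlt, hkeq⟩ := hrange k (List.mem_toFinset.1 hk)
    exact Finset.mem_image.2 ⟨h, Finset.mem_range.2 hlt, hkeq.symm⟩
  have hzero : ∀ x ∈ (Finset.range 256).image (fun h : ℕ => (h : Int) + 1),
      x ∉ boxes.keys.toFinset → pvG L x = 0 := by
    intro x _ hx
    have hnc : boxes.contains x = false := by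
      rw [PySem.Dict.contains_eq_decide_mem_keys]
      simp only [decide_eq_false_iff_not]
      exact fun hc => hx (List.mem_toFinset.2 hc)
    have hempty : (boxes.getD x PySem.Dict.empty).items = [] := by
      rw [PySem.Dict.getD_of_not_contains _ _ hnc]
      rfl
    have : L.items.filter (fun nf => pvHash nf.1 + 1 == x) = [] := by
      rw [← hfil x, hempty]
    unfold pvG
    rw [this]
    simp [pvWsum]
  rw [Finset.sum_subset hsub hzero]
  rw [Finset.sum_image (by
    intro a _ b _ hab
    have h' : (a : Int) + 1 = (b : Int) + 1 := hab
    omega)]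

theorem pvScoreB (L : PySem.Dict String Int) :
    (L.items.foldl pvScoreStep (PySem.Dict.empty, 0)).2
      = ∑ h ∈ Finset.range 256, pvG L ((h : Int) + 1) := by
  rw [pvScoreFold]
  have hempty : ∀ h : ℕ, (PySem.Dict.empty : PySem.Dict Int Int).getD (h : Int) 0 = 0 := by
    intro h; exact PySem.Dict.getD_empty _ _
  rw [zero_add]
  apply Finset.sum_congr rfl
  intro h _
  rw [hempty h]
  unfold pvG
  congr 1
  congr 1
  apply List.filter_congr
  intro x _
  exact (pvBeqShift (pvHash x.1) (h : Int)).symm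

-- ===== VERDICT (by name: the statement is the Claim_ definition above) =====
theorem part2_spec : Claim_equal_part2 := by
  intro problem_input _hdom hpre
  unfold Spec_part2 part2 part2_alt
  have hinv : pvInv (problem_input.foldl pvStepA PySem.Dict.empty)
      (problem_input.foldl pvStepB PySem.Dict.empty) := by
    apply pvInv_fold _ _ _ hpre
    refine ⟨List.nodup_nil, ?_, ?_⟩
    · intro k hk; simp [PySem.Dict.empty, PySem.Dict.keys] at hk
    · intro k; simp [PySem.Dict.getD, PySem.Dict.get?, PySem.Dict.empty]
  rw [pvScoreA _ _ hinv, pvScoreB]
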